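-- pv_equiv track=rewrite | github.com/2096955/MAKER-Code-Assist | tests/swe_bench_harness.py | _extract_patch_from_maker_output
-- ===== SOURCE A (Python) =====
-- from typing import Dict, List, Optional
--
-- def _extract_patch_from_maker_output(maker_result: Dict) -> str:
--     """
--     Extract unified diff patch from MAKER output
--     MAKER may return code blocks, file changes, or direct diff output
--     """
--     # Try to find unified diff in output
--     output_text = maker_result.get('output', '')
--
--     # Look for diff blocks
--     if 'diff --git' in output_text:
--         # Extract diff content
--         lines = output_text.split('\n')
--         diff_lines = []
--         in_diff = False
--
--         for line in lines:
--             if line.startswith('diff --git'):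
--                 in_diff = True
--             if in_diff:
--                 diff_lines.append(line)
--
--         return '\n'.join(diff_lines)
--
--     # Fallback: convert file changes to diff format
--     # This would require parsing MAKER's file modification output
--     # For now, return empty if no diff found
--     return ""
-- ===== SOURCE B (Python) =====
-- def _extract_patch_from_maker_output(maker_result):
--     """String-level: a diff starts at position 0 or right after a newline; no line splitting."""
--     output_text = maker_result.get('output', '')
--     if output_text.startswith('diff --git'):
--         return output_text
--     idx = output_text.find('\ndiff --git')
--     if idx != -1:
--         return output_text[idx + 1:]
--     return ""
-- ===== Notes on version B (the rewrite author's own statement) =====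
-- stated objective: alternative
-- what changed: B never splits the text into lines: a diff block starts at position 0 (startswith) or right after a newline (str.find of '\ndiff --git'), and the result is a single character-level slice of the whole string, instead of A's per-line flag-and-append loop over split('\n').
import Mathlib
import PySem

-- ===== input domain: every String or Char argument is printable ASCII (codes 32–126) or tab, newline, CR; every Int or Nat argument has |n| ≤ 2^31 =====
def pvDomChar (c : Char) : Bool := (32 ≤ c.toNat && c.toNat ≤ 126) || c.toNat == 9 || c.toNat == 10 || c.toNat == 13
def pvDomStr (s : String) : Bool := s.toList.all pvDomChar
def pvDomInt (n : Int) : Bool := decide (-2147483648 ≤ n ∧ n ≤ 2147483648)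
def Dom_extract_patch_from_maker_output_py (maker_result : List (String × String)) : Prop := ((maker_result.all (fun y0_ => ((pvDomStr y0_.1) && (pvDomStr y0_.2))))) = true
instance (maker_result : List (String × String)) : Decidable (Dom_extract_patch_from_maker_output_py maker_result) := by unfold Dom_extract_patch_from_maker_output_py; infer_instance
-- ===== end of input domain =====

-- B searches the raw string for a line-start occurrence of 'diff --git' (position 0 or right after '\n') and returns one slice, instead of A's split-into-lines flag-and-append loop; same return value on every input.


-- ===== PORT A =====
-- A's loop body: set in_diff when the line starts with 'diff --git', append while in_diff.
def pvStepA (st : Bool × List String) (line : String) : Bool × List String :=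
  let in_diff := if PySem.Str.startswith line "diff --git" then true else st.1
  (in_diff, if in_diff then st.2 ++ [line] else st.2)

def extract_patch_from_maker_output_py (maker_result : List (String × String)) : String :=
  let output_text := (PySem.Dict.ofList maker_result).getD "output" ""
  if PySem.Str.isIn "diff --git" output_text then
    -- split? is always `some` here: the separator "\n" is a nonempty literal
    let lines := (PySem.Str.split? output_text "\n").getD []
    let st := lines.foldl pvStepA (false, [])
    PySem.Str.join "\n" st.2
  else ""

-- ===== PORT B =====
def extract_patch_from_maker_output_py_alt (maker_result : List (String × String)) : String :=
  let output_text := (PySem.Dict.ofList maker_result).getD "output" ""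
  if PySem.Str.startswith output_text "diff --git" then output_text
  else
    let idx := PySem.Str.find output_text "\ndiff --git"
    if idx ≠ -1 then PySem.Str.slice output_text (some (idx + 1)) none
    else ""

-- ===== PRECONDITION & SPEC =====
def Spec_extract_patch_from_maker_output_py (maker_result : List (String × String)) (out : String) : Prop := out = extract_patch_from_maker_output_py_alt maker_result
instance (maker_result : List (String × String)) (out : String) : Decidable (Spec_extract_patch_from_maker_output_py maker_result out) := by unfold Spec_extract_patch_from_maker_output_py; infer_instance

-- ===== CLAIM (what is proved, stated in full; the proofs are below) =====
def Claim_equal_extract_patch_from_maker_output_py : Prop := ∀ (maker_result : List (String × String)), Dom_extract_patch_from_maker_output_py maker_result → Spec_extract_patch_from_maker_output_py maker_result (extract_patch_from_maker_output_py maker_result)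

-- ===== LEMMAS AND PROOFS =====

-- The marker as a character list.
def pvM : List Char := ['d', 'i', 'f', 'f', ' ', '-', '-', 'g', 'i', 't']

-- Reference splitter: split a character list at every '\n'.
def pvSplitNL : List Char → List (List Char)
  | [] => [[]]
  | c :: rest => if c = '\n' then [] :: pvSplitNL rest else (pvSplitNL rest).modifyHead (c :: ·)

-- A-side suffix of the line list: from the first line starting with the marker.
def pvTail (ls : List (List Char)) : List (List Char) :=
  match ls.findIdx? (fun l => PySem.Chars.startswith l pvM) with
  | some i => ls.drop i
  | none => []

-- B-side core on character lists.
def pvB (cs : List Char) : List Char :=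
  if PySem.Chars.startswith cs pvM then cs
  else if PySem.Chars.find cs ('\n' :: pvM) ≠ -1 then
    cs.drop (PySem.Chars.find cs ('\n' :: pvM) + 1).toNat
  else []

theorem pvSplitNL_ne_nil (cs : List Char) : pvSplitNL cs ≠ [] := by
  induction cs with
  | nil => simp [pvSplitNL]
  | cons c rest ih =>
    simp only [pvSplitNL]
    split
    · simp
    · cases h : pvSplitNL rest with
      | nil => exact absurd h ih
      | cons a t => simp

theorem pvSplitNL_join (cs : List Char) :
    PySem.Chars.join ['\n'] (pvSplitNL cs) = cs := by
  induction cs with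
  | nil => rfl
  | cons c rest ih =>
    simp only [pvSplitNL]
    by_cases h : c = '\n'
    · subst h
      simp only [PySem.Chars.join] at *
      cases hs : pvSplitNL rest with
      | nil => exact absurd hs (pvSplitNL_ne_nil rest)
      | cons a t =>
        rw [hs] at ih
        simp [List.intercalate] at ih ⊢
        exact ih
    · rw [if_neg h]
      cases hs : pvSplitNL rest with
      | nil => exact absurd hs (pvSplitNL_ne_nil rest)
      | cons a t =>
        rw [hs] at ih
        cases t with
        | nil => simp_all [PySem.Chars.join, List.intercalate]
        | cons b t' => simp_all [PySem.Chars.join, List.intercalate]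

theorem pvSplitNL_noNL (cs : List Char) : ∀ l ∈ pvSplitNL cs, '\n' ∉ l := by
  induction cs with
  | nil => simp [pvSplitNL]
  | cons c rest ih =>
    intro l hl
    simp only [pvSplitNL] at hl
    by_cases h : c = '\n'
    · rw [if_pos h, List.mem_cons] at hl
      rcases hl with hl | hl
      · simp [hl]
      · exact ih l hl
    · rw [if_neg h] at hl
      cases hs : pvSplitNL rest with
      | nil => exact absurd hs (pvSplitNL_ne_nil rest)
      | cons a t =>
        rw [hs] at hl ih
        rw [List.modifyHead_cons, List.mem_cons] at hl
        rcases hl with hl | hl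
        · subst hl
          intro hmem
          rw [List.mem_cons] at hmem
          rcases hmem with hmem | hmem
          · exact h hmem.symm
          · exact ih a (by simp) hmem
        · exact ih l (by simp [hl])

theorem pv_go_spec (l : List Char) : ∀ (fuel : Nat), l.length ≤ fuel → ∀ (cur : List Char) (acc : List (List Char)),
    PySem.Chars.splitOn.go ['\n'] fuel l cur acc
      = acc.reverse ++ (pvSplitNL l).modifyHead (cur.reverse ++ ·) := by
  induction l with
  | nil =>
    intro fuel _ cur acc
    cases fuel <;> simp [PySem.Chars.splitOn.go, pvSplitNL]
  | cons c rest ih =>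
    intro fuel hf cur acc
    cases fuel with
    | zero => simp at hf
    | succ fuel =>
      simp only [PySem.Chars.splitOn.go]
      by_cases h : c = '\n'
      · subst h
        rw [if_pos (by simp [List.isPrefixOf])]
        simp only [List.length_cons] at hf
        rw [show List.drop (List.length ['\n']) ('\n' :: rest) = rest by simp]
        rw [ih fuel (by omega) [] (List.reverse cur :: acc)]
        simp only [pvSplitNL, List.reverse_cons, List.append_assoc, List.singleton_append]
        cases hs : pvSplitNL rest with
        | nil => exact absurd hs (pvSplitNL_ne_nil rest)
        | cons a t => simp
      · rw [if_neg (by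
          simp only [List.isPrefixOf, Bool.and_eq_true, beq_iff_eq]
          exact fun hc => h hc.1.symm)]
        simp only [List.length_cons] at hf
        rw [ih fuel (by omega) (c :: cur) acc]
        simp only [pvSplitNL, if_neg h, List.modifyHead_modifyHead]
        have hfe : ((fun x => cur.reverse ++ x) ∘ fun x => c :: x)
            = (fun x => (c :: cur).reverse ++ x) := by
          funext x; simp
        rw [hfe]

theorem pv_splitOn_eq (cs : List Char) : PySem.Chars.splitOn cs ['\n'] = pvSplitNL cs := by
  rw [PySem.Chars.splitOn, pv_go_spec cs (cs.length + 1) (by omega) [] []]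
  cases h : pvSplitNL cs <;> simp

-- Once A's flag is set, the loop appends every remaining line.
theorem pv_foldl_flag_true (lines acc : List String) :
    lines.foldl pvStepA (true, acc) = (true, acc ++ lines) := by
  induction lines generalizing acc with
  | nil => simp
  | cons l ls ih =>
    rw [List.foldl_cons, show pvStepA (true, acc) l = (true, acc ++ [l]) by simp [pvStepA], ih]
    simp

-- Before the flag is set, A's accumulated lines are the suffix from the first matching line.
theorem pv_foldl_flag_false (lines : List String) :
    (lines.foldl pvStepA (false, [])).2
    = (match lines.findIdx? (fun l => PySem.Str.startswith l "diff --git") with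
       | some i => lines.drop i
       | none => ([] : List String)) := by
  induction lines with
  | nil => rfl
  | cons l ls ih =>
    rw [List.foldl_cons, List.findIdx?_cons]
    by_cases h : PySem.Str.startswith l "diff --git" = true
    · have h' : PySem.Chars.startswith l.toList ['d','i','f','f',' ','-','-','g','i','t'] = true := by
        simpa using h
      rw [show pvStepA (false, []) l = (true, [l]) by simp [pvStepA, h'], pv_foldl_flag_true]
      simp [h']
    · simp only [Bool.not_eq_true] at h
      have h' : PySem.Chars.startswith l.toList ['d','i','f','f',' ','-','-','g','i','t'] = false := by
        simpa using h
      rw [show pvStepA (false, []) l = (false, []) by simp [pvStepA, h'], ih]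
      simp only [h, Bool.false_eq_true, if_false]
      cases hf : ls.findIdx? (fun l => PySem.Str.startswith l "diff --git") <;> rfl

-- '\n' is not in the marker.
theorem pv_nl_not_mem_pvM : '\n' ∉ pvM := by decide

-- A newline-free prefix claim cannot cross a '\n'.
theorem pv_prefix_append_nl (l t : List Char) (h : ¬ pvM <+: l) : ¬ pvM <+: (l ++ '\n' :: t) := by
  intro hp
  by_cases hlen : pvM.length ≤ l.length
  · apply h
    have hp' := List.prefix_iff_eq_take.1 hp
    rw [List.take_append, Nat.sub_eq_zero_of_le hlen, List.take_zero, List.append_nil] at hp'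
    exact List.prefix_iff_eq_take.2 hp'
  · apply pv_nl_not_mem_pvM
    have hp' := List.prefix_iff_eq_take.1 hp
    rw [List.take_append, List.take_of_length_le (by omega)] at hp'
    obtain ⟨k, hk⟩ : ∃ k, pvM.length - l.length = k + 1 := ⟨pvM.length - l.length - 1, by omega⟩
    rw [hk, List.take_succ_cons] at hp'
    rw [hp']
    simp

-- find computes the unique first occurrence.
theorem pv_find_eq_of (s sub : List Char) (p : Nat)
    (h1 : sub <+: s.drop p) (h2 : ∀ i < p, ¬ sub <+: s.drop i) :
    PySem.Chars.find s sub = (p : Int) := by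
  have hin : PySem.Chars.isIn sub s = true :=
    (PySem.Chars.exists_prefix_drop_iff_isIn sub s).1 ⟨p, h1⟩
  have hnn : 0 ≤ PySem.Chars.find s sub := by
    rw [PySem.Chars.find_nonneg_iff]
    exact (PySem.Chars.isIn_iff_infix sub s).1 hin
  obtain ⟨hocc, hmin⟩ := PySem.Chars.find_spec hnn
  have h3 : ¬ (PySem.Chars.find s sub).toNat < p := fun hlt => h2 _ hlt hocc
  have h4 : ¬ p < (PySem.Chars.find s sub).toNat := fun hlt => hmin p hlt h1
  omega

-- In a newline-free list, '\n'::pvM never occurs.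
theorem pv_find_nl_none (l : List Char) (hl : '\n' ∉ l) :
    PySem.Chars.find l ('\n' :: pvM) = -1 := by
  rw [PySem.Chars.find_eq_neg_one_iff]
  intro hinf
  exact hl (hinf.mem (by simp))

theorem pv_drop_shift (l t : List Char) (j : Nat) :
    (l ++ '\n' :: t).drop (l.length + 1 + j) = t.drop j := by
  rw [List.drop_append, List.drop_of_length_le (by omega), List.nil_append]
  have h1 : l.length + 1 + j - l.length = j + 1 := by omega
  rw [h1, List.drop_succ_cons]

-- No occurrence of '\n'::pvM can start inside the newline-free first line.
theorem pv_no_occ_in_line (l t : List Char) (hl : '\n' ∉ l) (i : Nat) (hi : i < l.length) :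
    ¬ ('\n' :: pvM) <+: (l ++ '\n' :: t).drop i := by
  intro hp
  apply hl
  have hdrop : (l ++ '\n' :: t).drop i = l.drop i ++ '\n' :: t := by
    rw [List.drop_append, Nat.sub_eq_zero_of_le (by omega), List.drop_zero]
  rw [hdrop] at hp
  cases hld : l.drop i with
  | nil =>
    have := congrArg List.length hld
    simp at this
    omega
  | cons a rest =>
    rw [hld] at hp
    have ha : '\n' = a := (List.cons_prefix_cons.1 (by simpa [hld] using hp)).1
    have hmem : a ∈ l.drop i := by rw [hld]; simp
    rw [← ha] at hmem
    exact List.mem_of_mem_drop hmem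

-- find across the first line, when the marker starts the rest.
theorem pv_find_append_hit (l t : List Char) (hl : '\n' ∉ l) (ht : pvM <+: t) :
    PySem.Chars.find (l ++ '\n' :: t) ('\n' :: pvM) = (l.length : Int) := by
  apply pv_find_eq_of
  · rw [show (l ++ '\n' :: t).drop l.length = '\n' :: t by
      rw [List.drop_append]; simp]
    exact List.cons_prefix_cons.2 ⟨rfl, ht⟩
  · exact fun i hi => pv_no_occ_in_line l t hl i hi

-- find across the first line, when the marker does not start the rest.
theorem pv_join_singleton (l : List Char) : PySem.Chars.join ['\n'] [l] = l := by
  simp [PySem.Chars.join, List.intercalate]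

theorem pv_join_cons (l r : List Char) (rs : List (List Char)) :
    PySem.Chars.join ['\n'] (l :: r :: rs) = l ++ '\n' :: PySem.Chars.join ['\n'] (r :: rs) := by
  simp [PySem.Chars.join, List.intercalate]

theorem pv_find_append_miss_none (l t : List Char) (hl : '\n' ∉ l) (ht : ¬ pvM <+: t)
    (hf : PySem.Chars.find t ('\n' :: pvM) = -1) :
    PySem.Chars.find (l ++ '\n' :: t) ('\n' :: pvM) = -1 := by
  rw [PySem.Chars.find_eq_neg_one_iff] at hf ⊢
  intro hinf
  obtain ⟨j, hj⟩ := (PySem.Chars.exists_prefix_drop_iff_isIn ('\n' :: pvM) (l ++ '\n' :: t)).2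
    ((PySem.Chars.isIn_iff_infix _ _).2 hinf)
  rcases Nat.lt_trichotomy j l.length with hjl | hjl | hjl
  · exact pv_no_occ_in_line l t hl j hjl hj
  · subst hjl
    rw [show (l ++ '\n' :: t).drop l.length = '\n' :: t by
      rw [List.drop_append]; simp] at hj
    exact ht (List.cons_prefix_cons.1 hj).2
  · obtain ⟨k, hk⟩ : ∃ k, j = l.length + 1 + k := ⟨j - l.length - 1, by omega⟩
    subst hk
    rw [pv_drop_shift] at hj
    exact hf (hj.isInfix.trans (List.drop_suffix k t).isInfix)

theorem pv_find_append_miss_some (l t : List Char) (hl : '\n' ∉ l) (ht : ¬ pvM <+: t)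
    (hf : PySem.Chars.find t ('\n' :: pvM) ≠ -1) :
    PySem.Chars.find (l ++ '\n' :: t) ('\n' :: pvM)
      = (l.length : Int) + 1 + PySem.Chars.find t ('\n' :: pvM) := by
  have hj0 : 0 ≤ PySem.Chars.find t ('\n' :: pvM) := by
    have := PySem.Chars.neg_one_le_find t ('\n' :: pvM)
    omega
  obtain ⟨hocc, hmin⟩ := PySem.Chars.find_spec hj0
  have hres := pv_find_eq_of (l ++ '\n' :: t) ('\n' :: pvM)
    (l.length + 1 + (PySem.Chars.find t ('\n' :: pvM)).toNat)
    (by rw [pv_drop_shift]; exact hocc)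
    (by
      intro i hi hp
      rcases Nat.lt_trichotomy i l.length with hil | hil | hil
      · exact pv_no_occ_in_line l t hl i hil hp
      · subst hil
        rw [show (l ++ '\n' :: t).drop l.length = '\n' :: t by
          rw [List.drop_append]; simp] at hp
        exact ht (List.cons_prefix_cons.1 hp).2
      · obtain ⟨k, hk⟩ : ∃ k, i = l.length + 1 + k := ⟨i - l.length - 1, by omega⟩
        subst hk
        rw [pv_drop_shift] at hp
        exact hmin k (by omega) hp)
  rw [hres]
  omega

-- The marker prefixes the joined text iff it prefixes the first line.
theorem pv_startswith_join (l : List Char) (ls : List (List Char)) :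
    pvM <+: PySem.Chars.join ['\n'] (l :: ls) ↔ pvM <+: l := by
  cases ls with
  | nil => rw [pv_join_singleton]
  | cons r rs =>
    rw [pv_join_cons]
    constructor
    · intro h
      by_contra hc
      exact pv_prefix_append_nl l _ hc h
    · intro h
      exact h.trans (List.prefix_append _ _)

-- Main: B's string-level search equals A's line-level suffix, on a newline-free line list.
theorem pv_main (ls : List (List Char)) (hnl : ∀ l ∈ ls, '\n' ∉ l) (hne : ls ≠ []) :
    pvB (PySem.Chars.join ['\n'] ls) = PySem.Chars.join ['\n'] (pvTail ls) := by
  induction ls with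
  | nil => exact absurd rfl hne
  | cons l rest ih =>
    by_cases hp : pvM <+: l
    · have hsw : PySem.Chars.startswith (PySem.Chars.join ['\n'] (l :: rest)) pvM = true :=
        (PySem.Chars.startswith_iff _ _).2 ((pv_startswith_join l rest).2 hp)
      have htail : pvTail (l :: rest) = l :: rest := by
        unfold pvTail
        rw [List.findIdx?_cons, if_pos ((PySem.Chars.startswith_iff _ _).2 hp)]
        simp
      rw [pvB, if_pos hsw, htail]
    · have hswl : PySem.Chars.startswith l pvM = false := by
        rw [Bool.eq_false_iff]
        exact fun hc => hp ((PySem.Chars.startswith_iff _ _).1 hc)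
      have hsw : PySem.Chars.startswith (PySem.Chars.join ['\n'] (l :: rest)) pvM = false := by
        rw [Bool.eq_false_iff]
        exact fun hc => hp ((pv_startswith_join l rest).1 ((PySem.Chars.startswith_iff _ _).1 hc))
      have htail : pvTail (l :: rest) = pvTail rest := by
        unfold pvTail
        rw [List.findIdx?_cons, if_neg (by simp [hswl])]
        cases hfi : rest.findIdx? (fun x => PySem.Chars.startswith x pvM) with
        | none => simp
        | some i => simp
      rw [htail]
      cases rest with
      | nil =>
        rw [pv_join_singleton, pvB, if_neg (by simp [hswl]),
          if_neg (by simp [pv_find_nl_none l (hnl l (by simp))])]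
        rfl
      | cons r rs =>
        have hl : '\n' ∉ l := hnl l (by simp)
        have hjoin : PySem.Chars.join ['\n'] (l :: r :: rs)
            = l ++ '\n' :: PySem.Chars.join ['\n'] (r :: rs) := pv_join_cons l r rs
        have ihv := ih (fun x hx => hnl x (by simp [hx])) (by simp)
        by_cases hst : pvM <+: PySem.Chars.join ['\n'] (r :: rs)
        · have hfind := pv_find_append_hit l _ hl hst
          rw [pvB, if_neg (by simp [hsw]), hjoin, hfind,
            if_pos (by omega)]
          have hT : ((l.length : Int) + 1).toNat = l.length + 1 + 0 := by omega
          rw [hT, pv_drop_shift]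
          have htail2 : pvTail (r :: rs) = r :: rs := by
            unfold pvTail
            rw [List.findIdx?_cons,
              if_pos ((PySem.Chars.startswith_iff _ _).2 ((pv_startswith_join r rs).1 hst))]
            simp
          rw [htail2, List.drop_zero]
        · have hstf : PySem.Chars.startswith (PySem.Chars.join ['\n'] (r :: rs)) pvM = false := by
            rw [Bool.eq_false_iff]
            exact fun hc => hst ((PySem.Chars.startswith_iff _ _).1 hc)
          by_cases hf : PySem.Chars.find (PySem.Chars.join ['\n'] (r :: rs)) ('\n' :: pvM) = -1
          · have hfind := pv_find_append_miss_none l _ hl hst hf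
            rw [pvB, if_neg (by simp [hsw]), hjoin, hfind, if_neg (by simp)]
            rw [pvB, if_neg (by simp [hstf]), if_neg (by simp [hf])] at ihv
            exact ihv
          · have hj0 : 0 ≤ PySem.Chars.find (PySem.Chars.join ['\n'] (r :: rs)) ('\n' :: pvM) := by
              have := PySem.Chars.neg_one_le_find (PySem.Chars.join ['\n'] (r :: rs)) ('\n' :: pvM)
              omega
            have hfind := pv_find_append_miss_some l _ hl hst hf
            rw [pvB, if_neg (by simp [hsw]), hjoin, hfind, if_pos (by omega)]
            rw [pvB, if_neg (by simp [hstf]), if_pos hf] at ihv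
            rw [← ihv]
            have h1 : ((l.length : Int) + 1
                + PySem.Chars.find (PySem.Chars.join ['\n'] (r :: rs)) ('\n' :: pvM) + 1).toNat
                = l.length + 1
                  + ((PySem.Chars.find (PySem.Chars.join ['\n'] (r :: rs)) ('\n' :: pvM) + 1).toNat) := by
              omega
            rw [h1, pv_drop_shift]

-- The marker / pattern literals as character lists.
theorem pv_marker_toList : ("diff --git" : String).toList = pvM := rfl

-- B's port computes pvB on the character list.
theorem pv_alt_eq (text : String) :
    (if PySem.Str.startswith text "diff --git" then text
     else if PySem.Str.find text "\ndiff --git" ≠ (-1 : Int) then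
       PySem.Str.slice text (some (PySem.Str.find text "\ndiff --git" + 1)) none
     else "")
    = String.ofList (pvB text.toList) := by
  rw [pvB]
  rw [show PySem.Str.startswith text "diff --git"
      = PySem.Chars.startswith text.toList pvM from rfl]
  rw [show PySem.Str.find text "\ndiff --git"
      = PySem.Chars.find text.toList ('\n' :: pvM) from rfl]
  by_cases h1 : PySem.Chars.startswith text.toList pvM = true
  · rw [if_pos h1, if_pos h1]
    simp
  · rw [if_neg h1, if_neg h1]
    by_cases h2 : PySem.Chars.find text.toList ('\n' :: pvM) ≠ (-1 : Int)
    · rw [if_pos h2, if_pos h2]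
      have h0 : 0 ≤ PySem.Chars.find text.toList ('\n' :: pvM) := by
        have := PySem.Chars.neg_one_le_find text.toList ('\n' :: pvM)
        omega
      rw [show PySem.Str.slice text (some (PySem.Chars.find text.toList ('\n' :: pvM) + 1)) none
          = String.ofList (PySem.Chars.slice text.toList
              (some (PySem.Chars.find text.toList ('\n' :: pvM) + 1)) none) from rfl]
      congr 1
      rw [PySem.Chars.slice_eq_listSlice, PySem.List.slice_from _ (by omega)]
    · rw [if_neg h2, if_neg h2]

-- A's line loop computes the pvTail suffix on the split character list.
theorem pv_a_eq (text : String) :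
    PySem.Str.join "\n"
      ((((PySem.Str.split? text "\n").getD []).foldl pvStepA (false, [])).2)
    = String.ofList (PySem.Chars.join ['\n'] (pvTail (pvSplitNL text.toList))) := by
  have hsplit : PySem.Str.split? text "\n"
      = some (List.map String.ofList (pvSplitNL text.toList)) := by
    rw [PySem.Str.split?, show ("\n" : String).toList = ['\n'] from rfl,
      PySem.Chars.split?, if_neg (by simp), pv_splitOn_eq]
    rfl
  rw [hsplit, Option.getD_some, pv_foldl_flag_false, List.findIdx?_map]
  have hpred : ((fun l => PySem.Str.startswith l "diff --git") ∘ String.ofList)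
      = (fun x => PySem.Chars.startswith x pvM) := by
    funext x
    simp [PySem.Str.startswith, pv_marker_toList]
  rw [hpred]
  unfold pvTail
  cases hfi : (pvSplitNL text.toList).findIdx? (fun x => PySem.Chars.startswith x pvM) with
  | none =>
    rfl
  | some i =>
    dsimp only
    rw [← List.map_drop]
    rw [PySem.Str.join]
    congr 1
    rw [show ("\n" : String).toList = ['\n'] from rfl]
    congr 1
    rw [List.map_map]
    have : (String.toList ∘ String.ofList) = (id : List Char → List Char) := by
      funext x; simp
    rw [this, List.map_id]

-- pvB returns [] when the marker is not a substring at all.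
theorem pv_pvB_of_not_isIn (cs : List Char) (h : PySem.Chars.isIn pvM cs = false) :
    pvB cs = [] := by
  rw [PySem.Chars.isIn_eq_false_iff] at h
  rw [pvB, if_neg, if_neg]
  · intro hc
    apply h
    have : ('\n' :: pvM) <:+: cs := by
      rw [← PySem.Chars.find_ne_neg_one_iff]
      exact hc
    exact (List.suffix_cons '\n' pvM).isInfix.trans this
  · intro hc
    exact h ((PySem.Chars.startswith_iff _ _).1 hc).isInfix

-- ===== VERDICT (by name: the statement is the Claim_ definition above) =====
theorem extract_patch_from_maker_output_py_spec : Claim_equal_extract_patch_from_maker_output_py := by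
  intro maker_result _
  unfold Spec_extract_patch_from_maker_output_py
  unfold extract_patch_from_maker_output_py extract_patch_from_maker_output_py_alt
  dsimp only
  rw [pv_alt_eq]
  by_cases hin : PySem.Str.isIn "diff --git"
      ((PySem.Dict.ofList maker_result).getD "output" "") = true
  · rw [if_pos hin, pv_a_eq]
    congr 1
    have hmain := pv_main (pvSplitNL ((PySem.Dict.ofList maker_result).getD "output" "").toList)
      (pvSplitNL_noNL _) (pvSplitNL_ne_nil _)
    rw [pvSplitNL_join] at hmain
    exact hmain.symm
  · rw [if_neg hin]
    rw [pv_pvB_of_not_isIn _ (by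
      have : PySem.Str.isIn "diff --git" ((PySem.Dict.ofList maker_result).getD "output" "")
          = PySem.Chars.isIn pvM ((PySem.Dict.ofList maker_result).getD "output" "").toList := rfl
      rw [← this]
      simpa using hin)]
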